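-- pv_equiv track=rewrite | github.com/SanichMyshkin/Transfer | allocate-service/victoria/main.py | build_team_to_sid_maps
-- ===== SOURCE A (Python) =====
-- from collections import defaultdict
--
-- def is_all_zeros(s: str) -> bool:
--     s = (s or "").strip()
--     return bool(s) and set(s) == {"0"}
--
-- def normalize_sid(sid: str) -> str:
--     sid = (sid or "").strip()
--     if not sid:
--         return ""
--     if is_all_zeros(sid):
--         return ""
--     return sid
--
-- def build_team_to_sid_maps(series_rows):
--     team_sids = defaultdict(set)
--     for r in series_rows:
--         team_base = (r.get("team_base") or "").strip()
--         sid = normalize_sid(r.get("sid_seed"))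
--         if team_base and sid:
--             team_sids[team_base].add(sid)
--
--     team_to_sid = {}
--     ambiguous_teams = set()
--
--     for team_base, sids in team_sids.items():
--         if len(sids) == 1:
--             team_to_sid[team_base] = next(iter(sids))
--         elif len(sids) > 1:
--             ambiguous_teams.add(team_base)
--
--     return team_to_sid, ambiguous_teams
-- ===== SOURCE B (Python) =====
-- def build_team_to_sid_maps(series_rows):
--     # one pass: team -> representative sid, or None once two distinct sids were seen
--     state = {}
--     for r in series_rows:
--         team = (r.get("team_base") or "").strip()
--         sid = (r.get("sid_seed") or "").strip()
--         if not team or not sid or set(sid) == {"0"}: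
--             continue
--         prev = state.get(team, sid)
--         state[team] = sid if prev == sid else None
--     team_to_sid = {t: s for t, s in state.items() if s is not None}
--     ambiguous_teams = {t for t, s in state.items() if s is None}
--     return team_to_sid, ambiguous_teams
-- ===== Notes on version B (the rewrite author's own statement) =====
-- stated objective: simpler
-- what changed: B replaces A's two-phase algorithm (defaultdict of per-team sid sets, then a classification pass over the sets) by a single pass keeping one dict mapping each team to a single representative sid (or None once two distinct sids were seen), splitting that dict at the end; no per-team sets are ever built.
import Mathlib
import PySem

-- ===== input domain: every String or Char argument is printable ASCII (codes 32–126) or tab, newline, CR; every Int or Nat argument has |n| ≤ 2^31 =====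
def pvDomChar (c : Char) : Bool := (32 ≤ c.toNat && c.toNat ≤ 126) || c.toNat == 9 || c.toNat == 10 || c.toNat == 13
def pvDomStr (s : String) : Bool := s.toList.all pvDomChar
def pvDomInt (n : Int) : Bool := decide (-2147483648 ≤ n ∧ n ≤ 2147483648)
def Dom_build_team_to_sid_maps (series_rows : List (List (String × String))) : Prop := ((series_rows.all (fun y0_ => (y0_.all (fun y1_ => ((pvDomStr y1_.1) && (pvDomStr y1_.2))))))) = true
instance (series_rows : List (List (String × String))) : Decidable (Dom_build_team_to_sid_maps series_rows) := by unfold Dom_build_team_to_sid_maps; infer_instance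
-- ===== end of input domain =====

-- B replaces A's per-team sid-sets (defaultdict(set) + a second classification pass) by ONE dict holding a single
-- representative sid per team (None once two distinct sids were seen), split at the end; objective: simpler.

-- ===== PORT A =====
def is_all_zeros (s : String) : Bool :=
  let s := PySem.Str.strip s
  decide (s ≠ "") && PySem.Set.equal (PySem.Set.ofList s.toList) ['0']

def normalize_sid (sid : String) : String :=
  let sid := PySem.Str.strip sid
  if sid = "" then ""
  else if is_all_zeros sid then ""
  else sid

-- body of A's first loop (`for r in series_rows: … team_sids[team_base].add(sid)`)
def pvStepA (d : PySem.Dict String (PySem.Set String)) (r : List (String × String)) :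
    PySem.Dict String (PySem.Set String) :=
  let team_base := PySem.Str.strip ((PySem.Dict.mk r).getD "team_base" "")
  let sid := normalize_sid ((PySem.Dict.mk r).getD "sid_seed" "")
  if team_base ≠ "" ∧ sid ≠ "" then d.modify team_base [] (fun s => PySem.Set.add s sid) else d

-- body of A's second loop (`for team_base, sids in team_sids.items(): …`)
def pvCollectA (acc : PySem.Dict String String × PySem.Set String) (p : String × PySem.Set String) :
    PySem.Dict String String × PySem.Set String :=
  if p.2.length = 1 then (acc.1.insert p.1 (p.2.headD ""), acc.2)
  else if p.2.length > 1 then (acc.1, PySem.Set.add acc.2 p.1)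
  else acc

def build_team_to_sid_maps (series_rows : List (List (String × String))) :
    (List (String × String)) × List String :=
  let team_sids := series_rows.foldl pvStepA PySem.Dict.empty
  let res := team_sids.items.foldl pvCollectA (PySem.Dict.empty, PySem.Set.empty)
  (res.1.items, res.2)

-- ===== PORT B =====
-- body of B's single loop
def pvStepB (st : PySem.Dict String (Option String)) (r : List (String × String)) :
    PySem.Dict String (Option String) :=
  let team := PySem.Str.strip ((PySem.Dict.mk r).getD "team_base" "")
  let sid := PySem.Str.strip ((PySem.Dict.mk r).getD "sid_seed" "")
  if team = "" ∨ sid = "" ∨ PySem.Set.equal (PySem.Set.ofList sid.toList) ['0'] = true then st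
  else
    let prev := st.getD team (some sid)
    st.insert team (if prev = some sid then some sid else none)

def build_team_to_sid_maps_alt (series_rows : List (List (String × String))) :
    (List (String × String)) × List String :=
  let state := series_rows.foldl pvStepB PySem.Dict.empty
  (state.items.filterMap (fun p => p.2.map (fun s => (p.1, s))),
   (state.items.filter (fun p => p.2.isNone)).map Prod.fst)

-- ===== PRECONDITION & SPEC =====
def Spec_build_team_to_sid_maps (series_rows : List (List (String × String))) (out : (List (String × String)) × List String) : Prop := out = build_team_to_sid_maps_alt series_rows
instance (series_rows : List (List (String × String))) (out : (List (String × String)) × List String) : Decidable (Spec_build_team_to_sid_maps series_rows out) := by unfold Spec_build_team_to_sid_maps; infer_instance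

-- ===== CLAIM (what is proved, stated in full; the proofs are below) =====
def Claim_equal_build_team_to_sid_maps : Prop := ∀ (series_rows : List (List (String × String))), Dom_build_team_to_sid_maps series_rows → Spec_build_team_to_sid_maps series_rows (build_team_to_sid_maps series_rows)

-- ===== LEMMAS AND PROOFS =====

def pvF (sids : PySem.Set String) : Option String :=
  if sids.length = 1 then some (sids.headD "") else none

theorem pv_modify_eq (d : PySem.Dict String (PySem.Set String)) (k : String) (d0 : PySem.Set String)
    (f : PySem.Set String → PySem.Set String) : d.modify k d0 f = d.insert k (f (d.getD k d0)) := rfl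

theorem pv_val (sids : List String) (t : String) (h : sids ≠ []) :
    pvF (PySem.Set.add sids t) = (if pvF sids = some t then some t else none) := by
  unfold pvF
  by_cases h1 : sids.length = 1
  · obtain ⟨s, rfl⟩ := List.length_eq_one_iff.mp h1
    by_cases hst : t = s
    · subst hst
      rw [PySem.Set.add_of_mem (by simp)]
      simp
    · rw [PySem.Set.add_of_not_mem (by simpa using hst)]
      simp [Ne.symm hst]
  · have hp : 0 < sids.length := List.length_pos_iff.mpr h
    have hlen : (PySem.Set.add sids t).length ≠ 1 := by
      rw [PySem.Set.add_eq_ite]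
      split <;> simp <;> omega
    simp [hlen, h1]

theorem pv_strip_idem (l : List Char) :
    PySem.Chars.strip (PySem.Chars.strip l) = PySem.Chars.strip l := by
  unfold PySem.Chars.strip PySem.Chars.rstrip PySem.Chars.lstrip
  set p := PySem.Chars.isspace
  set u := List.dropWhile p l with hu
  have hu0 : ∀ (h : 0 < u.length), ¬ p (u[(0:Nat)]'h) = true := by
    rw [← List.dropWhile_eq_self_iff]; simp [hu, List.dropWhile_idempotent]
  set r := (List.dropWhile p u.reverse).reverse with hr
  have hpre : r <+: u := by
    have := (List.dropWhile_suffix (l := u.reverse) p).reverse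
    simpa [hr] using this
  have h1 : List.dropWhile p r = r := by
    rw [List.dropWhile_eq_self_iff]
    intro h
    have hlen : r.length ≤ u.length := hpre.length_le
    have h0u : 0 < u.length := lt_of_lt_of_le h hlen
    have heq : r[(0:Nat)]'h = u[(0:Nat)]'h0u := hpre.getElem h
    rw [heq]; exact hu0 h0u
  rw [h1, hr, List.reverse_reverse, List.dropWhile_idempotent]

theorem pv_str_strip_idem (s : String) :
    PySem.Str.strip (PySem.Str.strip s) = PySem.Str.strip s := by
  simp [PySem.Str.strip, pv_strip_idem]

theorem pv_norm (raw : String) :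
    normalize_sid raw =
      (if PySem.Str.strip raw = "" ∨ PySem.Set.equal (PySem.Set.ofList (PySem.Str.strip raw).toList) ['0'] = true
       then "" else PySem.Str.strip raw) := by
  simp only [normalize_sid, is_all_zeros, pv_str_strip_idem]
  by_cases h0 : PySem.Str.strip raw = ""
  · simp [h0]
  · by_cases h1 : PySem.Set.equal (PySem.Set.ofList (PySem.Str.strip raw).toList) ['0'] = true <;>
      simp [h0, h1]

theorem pv_get_rel {ν μ : Type} (f : ν → μ) (ld : List (String × ν)) (k : String) :
    (PySem.Dict.mk (ld.map (fun p => (p.1, f p.2)))).get? k = ((PySem.Dict.mk ld).get? k).map f := by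
  simp [PySem.Dict.get?, List.find?_map, Function.comp_def]

theorem pv_step (d : PySem.Dict String (PySem.Set String)) (st : PySem.Dict String (Option String))
    (r : List (String × String))
    (h1 : st.items = d.items.map (fun p => (p.1, pvF p.2)))
    (h2 : ∀ p ∈ d.items, p.2 ≠ [])
    (h3 : d.keys.Nodup) :
    (pvStepB st r).items = (pvStepA d r).items.map (fun p => (p.1, pvF p.2))
    ∧ (∀ p ∈ (pvStepA d r).items, p.2 ≠ [])
    ∧ (pvStepA d r).keys.Nodup := by
  obtain ⟨ld⟩ := d
  obtain ⟨lst⟩ := st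
  have hl : lst = ld.map (fun p => (p.1, pvF p.2)) := h1
  subst hl
  simp only [pvStepA, pvStepB, pv_norm]
  set team := PySem.Str.strip ((PySem.Dict.mk r).getD "team_base" "") with hteam
  set t := PySem.Str.strip ((PySem.Dict.mk r).getD "sid_seed" "") with ht
  by_cases hc : team = "" ∨ t = "" ∨ PySem.Set.equal (PySem.Set.ofList t.toList) ['0'] = true
  · rw [if_pos hc]
    have hA : ¬ (team ≠ "" ∧ (if t = "" ∨ PySem.Set.equal (PySem.Set.ofList t.toList) ['0'] = true then "" else t) ≠ "") := by
      rcases hc with h | h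
      · exact fun hx => hx.1 h
      · rw [if_pos h]
        exact fun hx => hx.2 rfl
    simp only [if_neg hA]
    exact ⟨trivial, h2, h3⟩
  · push Not at hc
    obtain ⟨hteam_ne, ht_ne, heq_ne⟩ := hc
    have hcond' : ¬(t = "" ∨ PySem.Set.equal (PySem.Set.ofList t.toList) ['0'] = true) := by
      simp [ht_ne, heq_ne]
    rw [if_neg (show ¬(team = "" ∨ t = "" ∨ PySem.Set.equal (PySem.Set.ofList t.toList) ['0'] = true) by simp [hteam_ne, ht_ne, heq_ne])]
    rw [if_neg hcond', if_pos (show team ≠ "" ∧ t ≠ "" from ⟨hteam_ne, ht_ne⟩), pv_modify_eq]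
    set D : PySem.Dict String (PySem.Set String) := ⟨ld⟩ with hD
    set ST : PySem.Dict String (Option String) := ⟨ld.map (fun p => (p.1, pvF p.2))⟩ with hST
    have hitems : ST.items = D.items.map (fun p => (p.1, pvF p.2)) := rfl
    have hget : ∀ k, ST.get? k = (D.get? k).map pvF := fun k => pv_get_rel pvF ld k
    by_cases hcont : D.contains team = true
    · obtain ⟨sids, hsids⟩ : ∃ sids, D.get? team = some sids := by
        rw [PySem.Dict.contains_eq_isSome_get?] at hcont
        exact Option.isSome_iff_exists.mp hcont
      have hmem : (team, sids) ∈ D.items := PySem.Dict.mem_items_of_get?_eq_some D hsids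
      have hne0 : sids ≠ [] := h2 _ hmem
      have hgd : D.getD team [] = sids := by rw [PySem.Dict.getD_eq_get?_getD, hsids]; rfl
      have hgdS : ST.getD team (some t) = pvF sids := by
        rw [PySem.Dict.getD_eq_get?_getD, hget, hsids]; rfl
      have hcontS : ST.contains team = true := by
        rw [PySem.Dict.contains_eq_isSome_get?, hget, hsids]; rfl
      rw [hgd, hgdS]
      refine ⟨?_, ?_, ?_⟩
      · rw [PySem.Dict.items_insert_of_contains ST _ hcontS,
            PySem.Dict.items_insert_of_contains D _ hcont, hitems]
        simp only [List.map_map]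
        apply List.map_congr_left
        intro p hp
        by_cases hk : p.1 = team
        · simp [hk, pv_val sids t hne0]
        · simp [hk]
      · intro p hp
        rw [PySem.Dict.items_insert_of_contains D _ hcont] at hp
        obtain ⟨q, hq, rfl⟩ := List.mem_map.mp hp
        by_cases hk : q.1 = team
        · simp only [hk, beq_self_eq_true, if_pos, ne_eq]
          rw [PySem.Set.add_eq_ite]
          split
          · exact hne0
          · simp
        · rw [if_neg (by simpa using hk)]
          exact h2 q hq
      · rw [PySem.Dict.keys_insert_of_contains D _ hcont]
        exact h3
    · have hcontF : D.contains team = false := by simpa using hcont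
      have hnone : D.get? team = none := (PySem.Dict.get?_eq_none_iff_contains D team).mpr hcontF
      have hcontSF : ST.contains team = false := by
        rw [← PySem.Dict.get?_eq_none_iff_contains ST team, hget, hnone]; rfl
      rw [PySem.Dict.getD_of_not_contains D _ hcontF,
          PySem.Dict.getD_of_not_contains ST _ hcontSF]
      rw [if_pos rfl]
      refine ⟨?_, ?_, ?_⟩
      · rw [PySem.Dict.items_insert_of_not_contains ST _ hcontSF,
            PySem.Dict.items_insert_of_not_contains D _ hcontF, hitems]
        rw [PySem.Set.add_of_not_mem (by simp)]
        simp [pvF]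
      · intro p hp
        rw [PySem.Dict.items_insert_of_not_contains D _ hcontF] at hp
        rcases List.mem_append.mp hp with h | h
        · exact h2 p h
        · simp only [List.mem_singleton] at h
          subst h
          rw [PySem.Set.add_of_not_mem (by simp)]
          simp
      · exact PySem.Dict.nodup_keys_insert D _ _ h3

theorem pv_phase1 (rows : List (List (String × String)))
    (d : PySem.Dict String (PySem.Set String)) (st : PySem.Dict String (Option String))
    (h1 : st.items = d.items.map (fun p => (p.1, pvF p.2)))
    (h2 : ∀ p ∈ d.items, p.2 ≠ [])
    (h3 : d.keys.Nodup) :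
    (rows.foldl pvStepB st).items = (rows.foldl pvStepA d).items.map (fun p => (p.1, pvF p.2))
    ∧ (∀ p ∈ (rows.foldl pvStepA d).items, p.2 ≠ [])
    ∧ (rows.foldl pvStepA d).keys.Nodup := by
  induction rows generalizing d st with
  | nil => exact ⟨h1, h2, h3⟩
  | cons r rows ih =>
      obtain ⟨g1, g2, g3⟩ := pv_step d st r h1 h2 h3
      exact ih _ _ g1 g2 g3

theorem pv_phase2 (l : List (String × PySem.Set String)) (a : PySem.Dict String String) (amb : List String)
    (hnd : (l.map (fun p => p.1)).Nodup)
    (hne : ∀ p ∈ l, p.2 ≠ [])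
    (hfresh : ∀ k ∈ l.map (fun p => p.1), a.contains k = false ∧ k ∉ amb) :
    (l.foldl pvCollectA (a, amb)).1.items
        = a.items ++ l.filterMap (fun p => (pvF p.2).map (fun s => (p.1, s)))
    ∧ (l.foldl pvCollectA (a, amb)).2
        = amb ++ (l.filter (fun p => (pvF p.2).isNone)).map (fun p => p.1) := by
  induction l generalizing a amb with
  | nil => simp
  | cons p l ih =>
    obtain ⟨k, sids⟩ := p
    simp only [List.map_cons, List.nodup_cons] at hnd
    obtain ⟨hk_notin, hnd'⟩ := hnd
    obtain ⟨hka, hkamb⟩ := hfresh k (by simp)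
    have hne0 : sids ≠ [] := hne (k, sids) (by simp)
    simp only [List.foldl_cons]
    by_cases h1 : sids.length = 1
    · have hstep : pvCollectA (a, amb) (k, sids) = (a.insert k (sids.headD ""), amb) := by
        unfold pvCollectA; simp [h1]
      rw [hstep]
      obtain ⟨ih1, ih2⟩ := ih (a.insert k (sids.headD "")) amb hnd'
        (fun q hq => hne q (by simp [hq]))
        (by
          intro k' hk'
          obtain ⟨hfa, hfamb⟩ := hfresh k' (by simp [hk'])
          have hkk : k' ≠ k := fun h => hk_notin (h ▸ hk')
          constructor
          · rw [PySem.Dict.contains_insert]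
            simp [hkk, hfa]
          · exact hfamb)
      refine ⟨?_, ?_⟩
      · rw [ih1, PySem.Dict.items_insert_of_not_contains a _ hka]
        have hf : pvF sids = some (sids.headD "") := by unfold pvF; rw [if_pos h1]
        simp [hf]
      · rw [ih2]
        have hf : pvF sids = some (sids.headD "") := by unfold pvF; rw [if_pos h1]
        simp [hf]
    · rcases Nat.lt_or_ge 1 sids.length with h2 | h2
      · have hstep : pvCollectA (a, amb) (k, sids) = (a, amb ++ [k]) := by
          unfold pvCollectA
          rw [if_neg (by simpa using h1), if_pos (by simpa using h2),
              PySem.Set.add_of_not_mem hkamb]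
        rw [hstep]
        obtain ⟨ih1, ih2⟩ := ih a (amb ++ [k]) hnd'
          (fun q hq => hne q (by simp [hq]))
          (by
            intro k' hk'
            obtain ⟨hfa, hfamb⟩ := hfresh k' (by simp [hk'])
            have hkk : k' ≠ k := fun h => hk_notin (h ▸ hk')
            exact ⟨hfa, by simp [hfamb, hkk]⟩)
        have hf : pvF sids = none := by unfold pvF; rw [if_neg h1]
        refine ⟨?_, ?_⟩
        · rw [ih1]; simp [hf]
        · rw [ih2]; simp [hf]
      · exfalso
        have : sids.length = 0 := by omega
        exact hne0 (List.length_eq_zero_iff.mp this)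

-- ===== VERDICT (by name: the statement is the Claim_ definition above) =====
theorem build_team_to_sid_maps_spec : Claim_equal_build_team_to_sid_maps := by
  intro rows _
  unfold Spec_build_team_to_sid_maps
  unfold build_team_to_sid_maps build_team_to_sid_maps_alt
  obtain ⟨H1, H2, H3⟩ := pv_phase1 rows PySem.Dict.empty PySem.Dict.empty rfl
    (by intro p hp; simp [PySem.Dict.empty] at hp) PySem.Dict.nodup_keys_empty
  set D := rows.foldl pvStepA PySem.Dict.empty with hD
  set ST := rows.foldl pvStepB PySem.Dict.empty with hST
  have hnd : (D.items.map (fun p => p.1)).Nodup := by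
    simpa [PySem.Dict.keys] using H3
  obtain ⟨P1, P2⟩ := pv_phase2 D.items PySem.Dict.empty [] hnd H2
    (by intro k _; simp [PySem.Dict.contains_empty])
  show ((List.foldl pvCollectA (PySem.Dict.empty, ([] : List String)) D.items).1.items,
        (List.foldl pvCollectA (PySem.Dict.empty, ([] : List String)) D.items).2)
      = (ST.items.filterMap (fun p => p.2.map (fun s => (p.1, s))),
         (ST.items.filter (fun p => p.2.isNone)).map Prod.fst)
  rw [H1, List.filterMap_map, List.filter_map, List.map_map]
  refine Prod.ext ?_ ?_
  · rw [P1]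
    simp [Function.comp_def, PySem.Dict.empty]
  · rw [P2]
    simp [Function.comp_def]
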